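-- pv_equiv track=rewrite | github.com/hsieh42/dicom2nifti | dicom2nifti/orientation.py | _is_valid_orientation
-- ===== SOURCE A (Python) =====
-- def _is_valid_orientation(orientation):
--     ''' Check if a nifti orientation is valid. The orientation has to have three unique letters
--         for three dimensional data, one for each dimension: left-right, anterior-posterior and
--         superior-inferior.
--
--         :param orientation: A nifti image orientation using CBICA "to" convention.
--         :type orientation: str
--         :returns: True if input string is a valid orientation.
--     '''
--     orientation = [s.upper() for s in orientation]
--
--     # if the string is shorter than three, fail it.
--     if len(''.join(orientation)) != 3:
--         return False
--
--     LR = False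
--     AP = False
--     SI = False
--     LRnotTwice = True
--     APnotTwice = True
--     SInotTwice = True
--
--     for o in orientation:
--         if o in ('R','L'):
--             if LR:
--                 LRnotTwice = False
--             LR = True
--         elif o in ('A','P'):
--             if AP:
--                 APnotTwice = False
--             AP = True
--         elif o in ('S','I'):
--             if SI:
--                 SInotTwice = False
--             SI = True
--     is_valid = (LR and AP and SI and LRnotTwice and APnotTwice and SInotTwice)
--     return is_valid
-- ===== SOURCE B (Python) =====
-- def _is_valid_orientation(orientation):
--     orientation = [s.upper() for s in orientation]
--
--     # if the string is shorter than three, fail it.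
--     if len(''.join(orientation)) != 3:
--         return False
--
--     axes = {'R': 'LR', 'L': 'LR', 'A': 'AP', 'P': 'AP', 'S': 'SI', 'I': 'SI'}
--     mapped = [axes[o] for o in orientation if o in axes]
--     return set(mapped) == {'LR', 'AP', 'SI'}
-- ===== Notes on version B (the rewrite author's own statement) =====
-- stated objective: idiomatic
-- what changed: Replaces the six-boolean seen/duplicate flag loop with a normalization map from each letter to its axis group and a single set comparison against the full set of three axis groups; duplicates and unrecognized letters make the set fall short, so no per-axis flags are maintained.
import Mathlib
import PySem

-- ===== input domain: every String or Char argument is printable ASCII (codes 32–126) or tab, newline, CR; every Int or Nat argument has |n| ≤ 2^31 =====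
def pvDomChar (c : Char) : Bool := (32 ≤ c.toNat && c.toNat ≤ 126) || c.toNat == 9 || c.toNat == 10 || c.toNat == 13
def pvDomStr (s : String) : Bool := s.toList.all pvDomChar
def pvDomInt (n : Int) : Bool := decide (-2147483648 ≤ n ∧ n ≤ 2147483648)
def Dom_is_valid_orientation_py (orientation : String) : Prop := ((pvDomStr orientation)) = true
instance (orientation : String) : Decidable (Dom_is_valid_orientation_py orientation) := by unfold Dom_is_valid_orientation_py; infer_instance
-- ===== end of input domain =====

-- B replaces A's six seen/duplicate boolean flags by mapping each letter to its
-- axis group and comparing the resulting set with {"LR","AP","SI"} (idiomatic, same cost).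

-- ===== PORT A =====
-- the loop body of A: six flags (LR, AP, SI, LRnotTwice, APnotTwice, SInotTwice)
def pvStepA (st : Bool × Bool × Bool × Bool × Bool × Bool) (o : Char) :
    Bool × Bool × Bool × Bool × Bool × Bool :=
  match st with
  | (lr, ap, si, lrn, apn, sin') =>
    if o = 'R' ∨ o = 'L' then (true, ap, si, if lr then false else lrn, apn, sin')
    else if o = 'A' ∨ o = 'P' then (lr, true, si, lrn, if ap then false else apn, sin')
    else if o = 'S' ∨ o = 'I' then (lr, ap, true, lrn, apn, if si then false else sin')
    else (lr, ap, si, lrn, apn, sin')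

def is_valid_orientation_py (orientation : String) : Bool :=
  let ors := orientation.toList.map PySem.Chars.upperChar
  if ors.length ≠ 3 then false
  else
    match ors.foldl pvStepA (false, false, false, true, true, true) with
    | (lr, ap, si, lrn, apn, sin') => lr && ap && si && lrn && apn && sin'

-- ===== PORT B =====
-- the literal dict axes = {'R':'LR', 'L':'LR', 'A':'AP', 'P':'AP', 'S':'SI', 'I':'SI'}
def pvAxes : PySem.Dict Char String :=
  PySem.Dict.ofList [('R', "LR"), ('L', "LR"), ('A', "AP"), ('P', "AP"), ('S', "SI"), ('I', "SI")]

def is_valid_orientation_py_alt (orientation : String) : Bool :=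
  let ors := orientation.toList.map PySem.Chars.upperChar
  if ors.length ≠ 3 then false
  else
    -- [axes[o] for o in orientation if o in axes] : membership test + lookup = get?
    let mapped := ors.filterMap (fun o => PySem.Dict.get? pvAxes o)
    PySem.Set.equal (PySem.Set.ofList mapped) (PySem.Set.ofList ["LR", "AP", "SI"])

-- ===== PRECONDITION & SPEC =====
def Spec_is_valid_orientation_py (orientation : String) (out : Bool) : Prop := out = is_valid_orientation_py_alt orientation
instance (orientation : String) (out : Bool) : Decidable (Spec_is_valid_orientation_py orientation out) := by unfold Spec_is_valid_orientation_py; infer_instance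

-- ===== CLAIM (what is proved, stated in full; the proofs are below) =====
def Claim_equal_is_valid_orientation_py : Prop := ∀ (orientation : String), Dom_is_valid_orientation_py orientation → Spec_is_valid_orientation_py orientation (is_valid_orientation_py orientation)

-- ===== LEMMAS AND PROOFS =====

-- each character only matters through its axis class: 0 = LR, 1 = AP, 2 = SI, 3 = other
def pvCls (o : Char) : Fin 4 :=
  if o = 'R' ∨ o = 'L' then 0 else if o = 'A' ∨ o = 'P' then 1 else if o = 'S' ∨ o = 'I' then 2 else 3

def pvStepC (st : Bool × Bool × Bool × Bool × Bool × Bool) (k : Fin 4) :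
    Bool × Bool × Bool × Bool × Bool × Bool :=
  match st with
  | (lr, ap, si, lrn, apn, sin') =>
    match k with
    | 0 => (true, ap, si, if lr then false else lrn, apn, sin')
    | 1 => (lr, true, si, lrn, if ap then false else apn, sin')
    | 2 => (lr, ap, true, lrn, apn, if si then false else sin')
    | 3 => (lr, ap, si, lrn, apn, sin')

def pvOptC (k : Fin 4) : Option String :=
  match k with
  | 0 => some "LR"
  | 1 => some "AP"
  | 2 => some "SI"
  | 3 => none

theorem pvStepA_eq (st : Bool × Bool × Bool × Bool × Bool × Bool) (o : Char) :
    pvStepA st o = pvStepC st (pvCls o) := by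
  obtain ⟨lr, ap, si, lrn, apn, sin'⟩ := st
  unfold pvStepA pvCls
  split_ifs <;> rfl

theorem pvGet_eq (o : Char) : PySem.Dict.get? pvAxes o = pvOptC (pvCls o) := by
  unfold pvCls
  split_ifs with h1 h2 h3
  · rcases h1 with rfl | rfl <;> rfl
  · rcases h2 with rfl | rfl <;> rfl
  · rcases h3 with rfl | rfl <;> rfl
  · rw [not_or] at h1 h2 h3
    have hd : pvAxes = PySem.Dict.mk [('R', "LR"), ('L', "LR"), ('A', "AP"), ('P', "AP"), ('S', "SI"), ('I', "SI")] := by decide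
    rw [hd]
    simp [Ne.symm h1.1, Ne.symm h1.2, Ne.symm h2.1, Ne.symm h2.2,
      Ne.symm h3.1, Ne.symm h3.2, PySem.Dict.get?, pvOptC]

theorem pvMain (x y z : Fin 4) :
    (match [x, y, z].foldl pvStepC (false, false, false, true, true, true) with
      | (lr, ap, si, lrn, apn, sin') => lr && ap && si && lrn && apn && sin') =
    PySem.Set.equal (PySem.Set.ofList ([x, y, z].filterMap pvOptC))
      (PySem.Set.ofList ["LR", "AP", "SI"]) := by
  revert x y z; decide

-- ===== VERDICT (by name: the statement is the Claim_ definition above) =====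
theorem is_valid_orientation_py_spec : Claim_equal_is_valid_orientation_py := by
  intro orientation _
  unfold Spec_is_valid_orientation_py is_valid_orientation_py is_valid_orientation_py_alt
  simp only
  set ors := orientation.toList.map PySem.Chars.upperChar with hors
  by_cases h : ors.length = 3
  · simp only [h, ne_eq, not_true_eq_false, if_false]
    have hstep : pvStepA = fun st o => pvStepC st (pvCls o) :=
      funext fun st => funext fun o => pvStepA_eq st o
    have hget : (fun o => PySem.Dict.get? pvAxes o) = fun o => pvOptC (pvCls o) :=
      funext pvGet_eq
    have hfold : ors.foldl pvStepA (false, false, false, true, true, true) =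
        (ors.map pvCls).foldl pvStepC (false, false, false, true, true, true) := by
      rw [hstep, ← List.foldl_map]
    have hmap : ors.filterMap (fun o => PySem.Dict.get? pvAxes o) =
        (ors.map pvCls).filterMap pvOptC := by
      rw [hget]
      conv_rhs => rw [List.filterMap_map]
      rfl
    rw [hfold, hmap]
    have hlen : (ors.map pvCls).length = 3 := by simp [h]
    obtain ⟨x, y, z, hxyz⟩ := List.length_eq_three.mp hlen
    rw [hxyz]
    exact pvMain x y z
  · simp [h]
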